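-- pv_equiv track=rewrite | github.com/NadaHussein00/Pet-Personality-Quiz | app/helpers.py | hash_password
-- ===== SOURCE A (Python) =====
-- def int_to_hex_char(n):
--     if 0 <= n <= 9:
--         return chr(ord('0') + n)
--     elif 10 <= n <= 15:
--         return chr(ord('a') + (n - 10))
--     else:
--         return '?'
--
-- def to_hex(num):
--     if num == 0:
--         return '0'
--     hex_digits = []
--     while num > 0:
--         remainder = num % 16
--         hex_digits.append(int_to_hex_char(remainder))
--         num = num // 16
--     hex_digits.reverse()
--     return ''.join(hex_digits)
--
-- def hash_password(s):
--     result = []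
--     for ch in s:
--         ascii_val = ord(ch)
--         multiplied = ascii_val * 16
--         hex_str = to_hex(multiplied)
--         result.append(hex_str)
--     return ''.join(result)
-- ===== SOURCE B (Python) =====
-- def hash_password(s):
--     return ''.join(format(ord(ch) * 16, 'x') for ch in s)
-- ===== Notes on version B (the rewrite author's own statement) =====
-- stated objective: idiomatic
-- what changed: Replaced the hand-rolled digit-extraction loop (modulo/divide, append, reverse, join) and the int_to_hex_char helper with the built-in base-16 formatter inside one join-of-comprehension; both helper functions disappear.
import Mathlib
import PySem

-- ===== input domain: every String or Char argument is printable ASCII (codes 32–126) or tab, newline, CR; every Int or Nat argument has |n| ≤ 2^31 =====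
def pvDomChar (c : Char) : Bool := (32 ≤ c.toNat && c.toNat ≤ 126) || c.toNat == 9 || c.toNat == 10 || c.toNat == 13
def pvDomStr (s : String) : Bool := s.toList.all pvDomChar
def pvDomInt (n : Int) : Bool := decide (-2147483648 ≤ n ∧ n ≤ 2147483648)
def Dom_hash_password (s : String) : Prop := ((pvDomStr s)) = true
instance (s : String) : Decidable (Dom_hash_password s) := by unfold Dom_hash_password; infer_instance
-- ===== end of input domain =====

-- B replaces the hand-rolled modulo/divide hex loop (and both helpers) with the library
-- base-16 formatter inside one join-of-map; same value on the whole domain, not faster.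

-- ===== PORT A =====
def int_to_hex_char (n : Int) : Char :=
  if 0 ≤ n ∧ n ≤ 9 then Char.ofNat ('0'.toNat + n.toNat)
  else if 10 ≤ n ∧ n ≤ 15 then Char.ofNat ('a'.toNat + (n - 10).toNat)
  else '?'

-- while num > 0 loop of to_hex; fuel only makes the recursion structural (num.toNat + 1 suffices)
def toHexLoop : Nat → Int → List Char → List Char
  | 0, _, acc => acc
  | f + 1, num, acc =>
    if num > 0 then
      toHexLoop f (PySem.Int.floordiv num 16) (acc ++ [int_to_hex_char (PySem.Int.mod num 16)])
    else acc

def to_hex (num : Int) : String :=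
  if num = 0 then "0"
  else ((toHexLoop (num.toNat + 1) num []).reverse).asString

def hash_password (s : String) : String :=
  String.join (s.toList.map (fun ch => to_hex ((ch.toNat : Int) * 16)))

-- ===== PORT B =====
-- format(n, 'x') for n ≥ 0 ported as Nat.toDigits 16 (lowercase digits, '0' at zero — exact match)
def hash_password_alt (s : String) : String :=
  String.join (s.toList.map (fun ch => (Nat.toDigits 16 (ch.toNat * 16)).asString))

-- ===== PRECONDITION & SPEC =====
def Spec_hash_password (s : String) (out : String) : Prop := out = hash_password_alt s
instance (s : String) (out : String) : Decidable (Spec_hash_password s out) := by unfold Spec_hash_password; infer_instance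

-- ===== CLAIM (what is proved, stated in full; the proofs are below) =====
def Claim_equal_hash_password : Prop := ∀ (s : String), Dom_hash_password s → Spec_hash_password s (hash_password s)

-- ===== LEMMAS AND PROOFS =====
theorem perChar : ∀ n : Nat, n < 127 →
    to_hex ((n : Int) * 16) = (Nat.toDigits 16 (n * 16)).asString := by decide

-- ===== VERDICT (by name: the statement is the Claim_ definition above) =====
theorem hash_password_spec : Claim_equal_hash_password := by
  intro s hdom
  unfold Spec_hash_password hash_password hash_password_alt
  congr 1
  apply List.map_congr_left
  intro c hc
  have hd : pvDomChar c = true := by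
    have := (List.all_eq_true.mp hdom) c hc
    simpa using this
  have hlt : c.toNat < 127 := by
    simp [pvDomChar] at hd
    omega
  exact perChar c.toNat hlt
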